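-- pv_equiv track=rewrite | github.com/anuragkanade/LanguageDetectionEnglishDutch | make_features.py | is_dutch_preposition_is_not_english_word
-- ===== SOURCE A (Python) =====
-- def is_dutch_preposition_is_not_english_word(line):
--     """
--     not including words which are dutch prepositions but are also english words
--
--     :param line: a single line of words
--     :return: true if line has a dutch preposition which is not a english word, false otherwise
--     """
--     dutch_prepositions = ["naar", "voor", "achter", "naast", "beneden", "boven", "onder", "op", "tussen", "het midden",
--                           "bij", "binnen", "buiten", "tegen", "rond", "sinds", "zonder", "na", "om"]
--     for word in dutch_prepositions:
--         test_term = " " + word + " "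
--         if line.find(test_term) != -1:
--             return True
--
--     return False
-- ===== SOURCE B (Python) =====
-- # B: tokenize the line once on single spaces; a padded " word " occurs exactly
-- # when 'word' is an interior token (space on both sides), so test the interior
-- # tokens against the 18 one-word prepositions, plus the adjacent pair
-- # ("het", "midden") for the two-word preposition "het midden".
-- _SINGLES = tuple(
--     "naar voor achter naast beneden boven onder op tussen bij binnen "
--     "buiten tegen rond sinds zonder na om".split(" "))
--
--
-- def is_dutch_preposition_is_not_english_word(line):
--     tokens = line.split(" ")
--     inner = tokens[1:][:-1]  # tokens with a separating space on both sides
--     if any(t in _SINGLES for t in inner):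
--         return True
--     return any(a == "het" and b == "midden" for a, b in zip(inner, inner[1:]))
-- ===== Notes on version B (the rewrite author's own statement) =====
-- stated objective: alternative
-- what changed: Replaces A's 19 independent full-line substring searches (line.find of each space-padded preposition) by a single tokenization of the line on spaces followed by set membership of the interior tokens (plus one adjacent-pair check for the two-word preposition 'het midden').
import Mathlib
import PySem

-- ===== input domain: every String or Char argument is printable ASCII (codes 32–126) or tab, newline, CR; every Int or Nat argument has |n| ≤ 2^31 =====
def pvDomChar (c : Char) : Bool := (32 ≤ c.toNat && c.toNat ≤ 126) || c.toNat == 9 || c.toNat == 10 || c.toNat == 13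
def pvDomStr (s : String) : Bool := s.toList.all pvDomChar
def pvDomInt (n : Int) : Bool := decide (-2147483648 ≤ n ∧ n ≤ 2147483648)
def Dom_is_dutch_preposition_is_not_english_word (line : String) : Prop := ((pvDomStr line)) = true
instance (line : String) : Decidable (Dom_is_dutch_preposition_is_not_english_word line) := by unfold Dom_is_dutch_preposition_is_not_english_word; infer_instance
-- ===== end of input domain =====

-- B tokenizes the line once on spaces and tests interior tokens for set membership
-- (plus the adjacent pair "het","midden"), instead of A's 19 full-line substring searches (alternative).


-- ===== PORT A =====
-- A's constant list of 19 Dutch prepositions, in A's order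
def dutchPrepositionsA : List String :=
  ["naar", "voor", "achter", "naast", "beneden", "boven", "onder", "op", "tussen",
   "het midden", "bij", "binnen", "buiten", "tegen", "rond", "sinds", "zonder", "na", "om"]

-- A's for-loop with early return: build " " + word + " " and test line.find(term) != -1
def loopA : List String → String → Bool
  | [], _ => false
  | word :: rest, line =>
      if PySem.Str.find line (" " ++ word ++ " ") ≠ -1 then true
      else loopA rest line

def is_dutch_preposition_is_not_english_word (line : String) : Bool :=
  loopA dutchPrepositionsA line

-- ===== PORT B =====
-- B's tuple of the 18 one-word prepositions, built by splitting one literal on " "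
def singlesB : List (List Char) :=
  PySem.Chars.splitOn
    ("naar voor achter naast beneden boven onder op tussen bij binnen " ++
     "buiten tegen rond sinds zonder na om").toList [' ']

-- B: tokens = line.split(" "); inner = tokens[1:][:-1];
-- any(t in _SINGLES for t in inner) or any adjacent pair ("het","midden") in zip(inner, inner[1:])
def is_dutch_preposition_is_not_english_word_alt (line : String) : Bool :=
  let tokens := PySem.Chars.splitOn line.toList [' ']
  let inner := PySem.List.slice (PySem.List.slice tokens (some 1) none) none (some (-1))
  if inner.any (fun t => singlesB.contains t) then true
  else (inner.zip (PySem.List.slice inner (some 1) none)).any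
        (fun p => p.1 == "het".toList && p.2 == "midden".toList)

-- ===== PRECONDITION & SPEC =====
def Spec_is_dutch_preposition_is_not_english_word (line : String) (out : Bool) : Prop := out = is_dutch_preposition_is_not_english_word_alt line
instance (line : String) (out : Bool) : Decidable (Spec_is_dutch_preposition_is_not_english_word line out) := by unfold Spec_is_dutch_preposition_is_not_english_word; infer_instance

-- ===== CLAIM (what is proved, stated in full; the proofs are below) =====
def Claim_equal_is_dutch_preposition_is_not_english_word : Prop := ∀ (line : String), Dom_is_dutch_preposition_is_not_english_word line → Spec_is_dutch_preposition_is_not_english_word line (is_dutch_preposition_is_not_english_word line)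

-- ===== LEMMAS AND PROOFS =====

-- A clean structural model of splitting on a single space
def split1 : List Char → List (List Char)
  | [] => [[]]
  | c :: rest => if c = ' ' then [] :: split1 rest else (split1 rest).modifyHead (c :: ·)

theorem split1_ne_nil (s : List Char) : split1 s ≠ [] := by
  induction s with
  | nil => simp [split1]
  | cons c rest ih =>
      simp only [split1]
      split_ifs
      · simp
      · obtain ⟨t, ts, hts⟩ := List.exists_cons_of_ne_nil ih
        simp [hts, List.modifyHead]

-- Chars.splitOn.go on separator [' '] computes split1
theorem splitOn_go_sp (fuel : Nat) :
    ∀ (s cur : List Char) (acc : List (List Char)), s.length < fuel →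
      PySem.Chars.splitOn.go [' '] fuel s cur acc
        = acc.reverse ++ (split1 s).modifyHead (cur.reverse ++ ·) := by
  induction fuel with
  | zero => intro s cur acc h; omega
  | succ n ih =>
      intro s cur acc h
      cases s with
      | nil => simp [PySem.Chars.splitOn.go, split1]
      | cons c rest =>
          by_cases hc : c = ' '
          · subst hc
            have : PySem.Chars.splitOn.go [' '] (n+1) (' ' :: rest) cur acc
                = PySem.Chars.splitOn.go [' '] n rest [] (cur.reverse :: acc) := by
              simp [PySem.Chars.splitOn.go, List.isPrefixOf]
            rw [this, ih rest [] (cur.reverse :: acc) (by simpa using Nat.lt_of_succ_lt_succ h)]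
            obtain ⟨t, ts, hts⟩ := List.exists_cons_of_ne_nil (split1_ne_nil rest)
            simp [split1, hts, List.modifyHead]
          · have hc' : ¬ (' ' = c) := fun h' => hc h'.symm
            have : PySem.Chars.splitOn.go [' '] (n+1) (c :: rest) cur acc
                = PySem.Chars.splitOn.go [' '] n rest (c :: cur) acc := by
              simp [PySem.Chars.splitOn.go, List.isPrefixOf, hc']
            rw [this, ih rest (c :: cur) acc (by simpa using Nat.lt_of_succ_lt_succ h)]
            obtain ⟨t, ts, hts⟩ := List.exists_cons_of_ne_nil (split1_ne_nil rest)
            simp [split1, hc, hts, List.modifyHead]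
  
theorem splitOn_sp (s : List Char) : PySem.Chars.splitOn s [' '] = split1 s := by
  show PySem.Chars.splitOn.go [' '] (s.length + 1) s [] [] = _
  rw [splitOn_go_sp (s.length + 1) s [] [] (by omega)]
  cases h : split1 s <;> simp [List.modifyHead]

theorem split1_nospace (t : List Char) (h : ' ' ∉ t) : split1 t = [t] := by
  induction t with
  | nil => simp [split1]
  | cons c rest ih =>
      have hc : c ≠ ' ' := fun hc => h (by simp [hc])
      rw [split1, if_neg hc, ih (fun hm => h (List.mem_cons_of_mem _ hm))]
      simp [List.modifyHead]

theorem split1_append (a b : List Char) :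
    split1 (a ++ ' ' :: b) = split1 a ++ split1 b := by
  induction a with
  | nil => simp [split1]
  | cons c a' ih =>
      by_cases hc : c = ' '
      · simp [split1, hc, ih]
      · obtain ⟨t, ts, hts⟩ := List.exists_cons_of_ne_nil (split1_ne_nil a')
        simp [split1, hc, ih, hts, List.modifyHead]

-- joining tokens back with single spaces
def joinSp : List (List Char) → List Char
  | [] => []
  | [t] => t
  | t :: ts => t ++ ' ' :: joinSp ts

theorem joinSp_cons₂ (t u : List Char) (us : List (List Char)) :
    joinSp (t :: u :: us) = t ++ ' ' :: joinSp (u :: us) := rfl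

theorem joinSp_cons (t : List Char) (ts : List (List Char)) (h : ts ≠ []) :
    joinSp (t :: ts) = t ++ ' ' :: joinSp ts := by
  obtain ⟨u, us, rfl⟩ := List.exists_cons_of_ne_nil h
  exact joinSp_cons₂ t u us

theorem joinSp_split1 (s : List Char) : joinSp (split1 s) = s := by
  induction s with
  | nil => simp [split1, joinSp]
  | cons c rest ih =>
      by_cases hc : c = ' '
      · rw [split1, if_pos hc, joinSp_cons _ _ (split1_ne_nil rest), ih, hc]; rfl
      · obtain ⟨t, ts, hts⟩ := List.exists_cons_of_ne_nil (split1_ne_nil rest)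
        rw [split1, if_neg hc, hts, List.modifyHead]
        rw [hts] at ih
        cases ts with
        | nil => simpa [joinSp] using congrArg (c :: ·) ih
        | cons u us =>
            rw [joinSp_cons₂] at ih ⊢
            rw [List.cons_append]
            exact congrArg (c :: ·) ih

theorem joinSp_append (l1 l2 : List (List Char)) (h1 : l1 ≠ []) (h2 : l2 ≠ []) :
    joinSp (l1 ++ l2) = joinSp l1 ++ ' ' :: joinSp l2 := by
  induction l1 with
  | nil => exact absurd rfl h1
  | cons t ts ih =>
      cases ts with
      | nil => rw [List.cons_append, List.nil_append, joinSp_cons _ _ h2]; rfl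
      | cons u us =>
          have ih' := ih (by simp)
          simp only [List.cons_append] at ih' ⊢
          rw [joinSp_cons₂, ih', joinSp_cons₂]
          simp

theorem split1_joinSp (ws : List (List Char)) (hne : ws ≠ [])
    (hsp : ∀ t ∈ ws, ' ' ∉ t) : split1 (joinSp ws) = ws := by
  induction ws with
  | nil => exact absurd rfl hne
  | cons t ts ih =>
      cases ts with
      | nil => simpa [joinSp] using split1_nospace t (hsp t (by simp))
      | cons u us =>
          rw [joinSp_cons _ _ (by simp), split1_append,
            split1_nospace t (hsp t (by simp)), ih (by simp)
              (fun x hx => hsp x (List.mem_cons_of_mem _ hx))]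
          simp

-- CENTRAL LEMMA: a single-space-padded join of space-free tokens is an infix of s
-- exactly when those tokens occur consecutively strictly inside split1 s
theorem padded_infix_iff (s : List Char) (ws : List (List Char)) (hne : ws ≠ [])
    (hsp : ∀ t ∈ ws, ' ' ∉ t) :
    (' ' :: (joinSp ws ++ [' '])) <:+: s ↔
      ∃ pre suf, split1 s = pre ++ ws ++ suf ∧ pre ≠ [] ∧ suf ≠ [] := by
  constructor
  · rintro ⟨u, v, hs⟩
    refine ⟨split1 u, split1 v, ?_, split1_ne_nil u, split1_ne_nil v⟩
    have hs' : s = u ++ ' ' :: (joinSp ws ++ ' ' :: v) := by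
      rw [← hs]; simp
    rw [hs', split1_append, split1_append, split1_joinSp ws hne hsp,
      List.append_assoc]
  · rintro ⟨pre, suf, hsplit, hpre, hsuf⟩
    have hs : s = joinSp pre ++ (' ' :: (joinSp ws ++ [' '])) ++ joinSp suf := by
      have := joinSp_split1 s
      rw [hsplit, List.append_assoc,
        joinSp_append pre (ws ++ suf) hpre (by simp [hne]),
        joinSp_append ws suf hne hsuf] at this
      rw [← this]; simp
    exact ⟨joinSp pre, joinSp suf, hs.symm⟩

-- membership in the interior slice tokens[1:][:-1]
theorem inner_run_iff {α : Type} (l : List α) (ws : List α) (hne : ws ≠ []) :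
    (∃ p q, l.tail.dropLast = p ++ ws ++ q) ↔
      ∃ pre suf, l = pre ++ ws ++ suf ∧ pre ≠ [] ∧ suf ≠ [] := by
  constructor
  · rintro ⟨p, q, h⟩
    cases l with
    | nil =>
        exfalso
        have hl : p = [] ∧ ws = [] ∧ q = [] := by
          simpa using (congrArg List.length h).symm
        exact hne hl.2.1
    | cons x m =>
        simp only [List.tail_cons] at h
        rcases List.eq_nil_or_concat m with hm | ⟨L, a, rfl⟩
        · subst hm
          exfalso
          have hl : p = [] ∧ ws = [] ∧ q = [] := by
            simpa using (congrArg List.length h).symm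
          exact hne hl.2.1
        · simp only [List.concat_eq_append] at h ⊢
          rw [List.dropLast_concat] at h
          refine ⟨x :: p, q ++ [a], ?_, by simp, by simp⟩
          rw [h]; simp
  · rintro ⟨pre, suf, rfl, hpre, hsuf⟩
    obtain ⟨x, p', rfl⟩ := List.exists_cons_of_ne_nil hpre
    rcases List.eq_nil_or_concat suf with rfl | ⟨q', last, rfl⟩
    · exact absurd rfl hsuf
    · refine ⟨p', q', ?_⟩
      simp only [List.concat_eq_append] at hsuf ⊢
      rw [List.cons_append, List.cons_append, List.tail_cons]
      have : p' ++ ws ++ (q' ++ [last]) = (p' ++ ws ++ q') ++ [last] := by simp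
      rw [this, List.dropLast_concat]

-- adjacency via zip with the tail
theorem zip_tail_mem_iff {α : Type} [DecidableEq α] (l : List α) (a b : α) :
    (a, b) ∈ l.zip l.tail ↔ ∃ p q, l = p ++ a :: b :: q := by
  induction l with
  | nil => simp
  | cons x m ih =>
      cases m with
      | nil =>
          constructor
          · intro h; simp at h
          · rintro ⟨p, q, hpq⟩
            have := congrArg List.length hpq
            simp at this
            omega
      | cons y m' =>
          simp only [List.tail_cons, List.zip_cons_cons, List.mem_cons, Prod.mk.injEq]
          rw [List.tail_cons] at ih
          constructor
          · rintro (⟨rfl, rfl⟩ | h)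
            · exact ⟨[], m', rfl⟩
            · obtain ⟨p, q, hpq⟩ := ih.mp h
              exact ⟨x :: p, q, by rw [hpq]; rfl⟩
          · rintro ⟨p, q, hpq⟩
            cases p with
            | nil => simp at hpq; exact Or.inl ⟨hpq.1.symm, hpq.2.1.symm⟩
            | cons z p' =>
                right
                apply ih.mpr
                refine ⟨p', q, ?_⟩
                have := congrArg List.tail hpq
                simpa using this

-- A's loop returns true iff some padded preposition is an infix of the line
theorem loopA_iff (ps : List String) (line : String) :
    loopA ps line = true ↔
      ∃ w ∈ ps, (' ' :: (w.toList ++ [' '])) <:+: line.toList := by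
  induction ps with
  | nil => simp [loopA]
  | cons w ws ih =>
      have hterm : (" " ++ w ++ " ").toList = ' ' :: (w.toList ++ [' ']) := by simp
      simp only [loopA, ne_eq, ite_not, List.mem_cons, exists_eq_or_imp,
        PySem.Str.find_eq, hterm]
      by_cases h : (' ' :: (w.toList ++ [' '])) <:+: line.toList
      · have hf := (PySem.Chars.find_ne_neg_one_iff line.toList _).mpr h
        simp [hf, h]
      · have hf := (PySem.Chars.find_eq_neg_one_iff line.toList _).mpr h
        simp [hf, h, ih]

-- the concrete value of B's split-built tuple of one-word prepositions
theorem singlesB_eq : singlesB =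
    ["naar".toList, "voor".toList, "achter".toList, "naast".toList, "beneden".toList,
     "boven".toList, "onder".toList, "op".toList, "tussen".toList, "bij".toList,
     "binnen".toList, "buiten".toList, "tegen".toList, "rond".toList, "sinds".toList,
     "zonder".toList, "na".toList, "om".toList] := by decide

-- each of B's single tokens is space-free and comes from A's list, and conversely
theorem singles_sub : ∀ t ∈ singlesB, ' ' ∉ t ∧ ∃ w ∈ dutchPrepositionsA, w.toList = t := by
  rw [singlesB_eq]; decide

theorem prepsA_sub :
    ∀ w ∈ dutchPrepositionsA, w = "het midden" ∨ (w.toList ∈ singlesB ∧ ' ' ∉ w.toList) := by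
  rw [singlesB_eq]; decide

-- B returns true iff some padded preposition is an infix of the line
theorem altB_iff (line : String) :
    is_dutch_preposition_is_not_english_word_alt line = true ↔
      ∃ w ∈ dutchPrepositionsA, (' ' :: (w.toList ++ [' '])) <:+: line.toList := by
  unfold is_dutch_preposition_is_not_english_word_alt
  dsimp only
  rw [splitOn_sp, PySem.List.slice_from_one, PySem.List.slice_to_neg_one,
    PySem.List.slice_from_one]
  have hinner :
      ∀ t, (∃ p q, (split1 line.toList).tail.dropLast = p ++ [t] ++ q) ↔
        t ∈ (split1 line.toList).tail.dropLast := by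
    intro t
    constructor
    · rintro ⟨p, q, h⟩; rw [h]; simp
    · intro h; obtain ⟨p, q, h⟩ := List.append_of_mem h; exact ⟨p, q, by simpa using h⟩
  constructor
  · intro h
    by_cases hany :
        ((split1 line.toList).tail.dropLast).any (fun t => singlesB.contains t) = true
    · obtain ⟨t, ht, hmem⟩ := List.any_eq_true.mp hany
      replace hmem : t ∈ singlesB := by simpa using hmem
      obtain ⟨hsp, w, hw, rfl⟩ := singles_sub t hmem
      have hws : ∃ pre suf, split1 line.toList = pre ++ [w.toList] ++ suf ∧ pre ≠ [] ∧ suf ≠ [] :=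
        (inner_run_iff _ [w.toList] (by simp)).mp ((hinner _).mpr ht)
      have hinf : (' ' :: (joinSp [w.toList] ++ [' '])) <:+: line.toList :=
        (padded_infix_iff _ [w.toList] (by simp) (by simpa using hsp)).mpr hws
      exact ⟨w, hw, by simpa [joinSp] using hinf⟩
    · rw [if_neg (by simpa using hany)] at h
      obtain ⟨⟨a, b⟩, hab, hprop⟩ := List.any_eq_true.mp h
      simp only [Bool.and_eq_true, beq_iff_eq] at hprop
      obtain ⟨rfl, rfl⟩ := hprop
      have hadj := (zip_tail_mem_iff _ _ _).mp hab
      obtain ⟨p, q, hpq⟩ := hadj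
      have hws : ∃ pre suf, split1 line.toList
          = pre ++ ["het".toList, "midden".toList] ++ suf ∧ pre ≠ [] ∧ suf ≠ [] :=
        (inner_run_iff _ _ (by simp)).mp ⟨p, q, by simpa using hpq⟩
      have hinf := (padded_infix_iff line.toList ["het".toList, "midden".toList]
        (by simp) (by decide)).mpr hws
      exact ⟨"het midden", by simp [dutchPrepositionsA], by simpa [joinSp] using hinf⟩
  · rintro ⟨w, hw, hinf⟩
    have key : ∀ (t : List Char), ' ' ∉ t →
        (' ' :: (t ++ [' '])) <:+: line.toList →
        t ∈ (split1 line.toList).tail.dropLast := by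
      intro t hsp hi
      have := (padded_infix_iff line.toList [t] (by simp) (by simpa using hsp)).mp
        (by simpa [joinSp] using hi)
      exact (hinner t).mp ((inner_run_iff _ [t] (by simp)).mpr this)
    rcases prepsA_sub w hw with rfl | ⟨hwmem, hsp⟩
    · have hws := (padded_infix_iff line.toList ["het".toList, "midden".toList]
        (by simp) (by decide)).mp (by simpa [joinSp] using hinf)
      obtain ⟨p, q, hpq⟩ := (inner_run_iff _ _ (by simp)).mpr hws
      have hz : ("het".toList, "midden".toList)
          ∈ ((split1 line.toList).tail.dropLast).zip ((split1 line.toList).tail.dropLast).tail :=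
        (zip_tail_mem_iff _ _ _).mpr ⟨p, q, by simpa using hpq⟩
      by_cases hany :
          ((split1 line.toList).tail.dropLast).any (fun t => singlesB.contains t) = true
      · rw [if_pos hany]
      · rw [if_neg (by simpa using hany)]
        exact List.any_eq_true.mpr ⟨_, hz, by simp⟩
    · have hmem := key w.toList hsp hinf
      rw [if_pos (List.any_eq_true.mpr ⟨_, hmem, by simpa using hwmem⟩)]

-- ===== VERDICT (by name: the statement is the Claim_ definition above) =====
theorem is_dutch_preposition_is_not_english_word_spec : Claim_equal_is_dutch_preposition_is_not_english_word := by
  intro line _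
  unfold Spec_is_dutch_preposition_is_not_english_word is_dutch_preposition_is_not_english_word
  rw [Bool.eq_iff_iff, loopA_iff, altB_iff]
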